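-- pv_equiv track=rewrite | github.com/montrie/PSpaMM_SVE | pspamm/scripts/max_arm_sme.py | get_blocksize
-- ===== SOURCE A (Python) =====
-- def get_blocksize(m, n, k, v_size=2):
--     bm_ovh = m % v_size
--     bn_ovh = n % v_size
--     bk_ovh = k % v_size
--     bm = 2
--     bn = 1
--     bk = 2
--     maxval = 0
--
--     # TODO: bk > 1 ?
--     for h in range(2, k + 1):
--         for i in range(1, m + 1, 1):
-- # TODO: next_multiple also for j param, similar to i!
--             next_multiple = i
--             while next_multiple % v_size != 0:
--                 next_multiple += 1
--             for j in range(1, n + 1):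
-- #                if ARM_condition(next_multiple, j, h, v_size) and tileable(m, i):
-- #                   (bn*0 + bk) * vm + bn * bk <= 32
--                 if (j*0 + h) * (-(i // -v_size)) + j * h <= 32:
--                     if i * j * h >= maxval:
--                         maxval = i * j * h
--                         bm = i
--                         bn = j
--                         bk = h
--
--     return (bm, bn, bk)
-- ===== SOURCE B (Python) =====
-- def get_blocksize(m, n, k, v_size=2):
--     bm, bn, bk = 2, 1, 2
--     maxval = 0
--     for h in range(2, k + 1):
--         for i in range(1, m + 1):
--             c = -(i // -v_size)          # ceil(i / v_size)
--             jmax = min(n, 32 // h - c)   # largest feasible j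
--             if jmax >= 1:
--                 val = i * jmax * h
--                 if val >= maxval:
--                     maxval, bm, bn, bk = val, i, jmax, h
--     return (bm, bn, bk)
-- ===== Notes on version B (the rewrite author's own statement) =====
-- stated objective: faster
-- what changed: The inner j-loop (and the dead next_multiple while-loop) are replaced by a closed-form computation of the single best feasible j, jmax = min(n, 32//h - ceil(i/v_size)), since i*j*h is increasing in j; the h and i loops and the >= tie-break update are kept.
import Mathlib
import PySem

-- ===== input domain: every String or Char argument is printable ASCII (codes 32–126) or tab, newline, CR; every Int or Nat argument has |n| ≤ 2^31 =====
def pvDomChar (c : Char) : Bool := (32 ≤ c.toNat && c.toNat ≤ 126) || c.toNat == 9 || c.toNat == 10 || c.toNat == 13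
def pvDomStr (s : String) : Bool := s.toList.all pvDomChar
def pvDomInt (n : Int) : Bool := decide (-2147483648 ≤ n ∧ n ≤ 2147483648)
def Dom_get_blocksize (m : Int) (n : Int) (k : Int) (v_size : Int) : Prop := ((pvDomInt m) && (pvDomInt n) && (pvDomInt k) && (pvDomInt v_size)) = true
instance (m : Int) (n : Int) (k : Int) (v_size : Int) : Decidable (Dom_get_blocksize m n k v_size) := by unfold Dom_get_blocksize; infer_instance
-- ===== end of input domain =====

-- B replaces the inner j-loop by the closed-form best feasible j (jmax = min n (32//h - ceil(i/v_size))): asymptotically fewer iterations, same result.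

-- ===== PORT A =====
-- Python's dead `while next_multiple % v_size != 0: next_multiple += 1`; fuel v_size.natAbs
-- suffices exactly when v_size ≠ 0 (guaranteed by Pre_); the value is unused by the function.
def pvWhileNext (v : Int) : Nat → Int → Int
  | 0, nm => nm
  | fuel+1, nm => if PySem.Int.mod nm v ≠ 0 then pvWhileNext v fuel (nm + 1) else nm

def get_blocksize (m : Int) (n : Int) (k : Int) (v_size : Int) : List Int :=
  let _bm_ovh := PySem.Int.mod m v_size
  let _bn_ovh := PySem.Int.mod n v_size
  let _bk_ovh := PySem.Int.mod k v_size
  let st := (PySem.List.pyRange 2 (k+1) 1).foldl (fun st h =>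
    (PySem.List.pyRange 1 (m+1) 1).foldl (fun st i =>
      let _next_multiple := pvWhileNext v_size v_size.natAbs i
      (PySem.List.pyRange 1 (n+1) 1).foldl (fun st j =>
        if (j*0 + h) * (-(PySem.Int.floordiv i (-v_size))) + j * h ≤ 32 then
          (if i * j * h ≥ st.1 then (i * j * h, i, j, h) else st)
        else st) st) st) ((0:Int), (2:Int), (1:Int), (2:Int))
  [st.2.1, st.2.2.1, st.2.2.2]

-- ===== PORT B =====
def get_blocksize_alt (m : Int) (n : Int) (k : Int) (v_size : Int) : List Int :=
  let st := (PySem.List.pyRange 2 (k+1) 1).foldl (fun st h =>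
    (PySem.List.pyRange 1 (m+1) 1).foldl (fun st i =>
      let c := -(PySem.Int.floordiv i (-v_size))
      let jmax := min n (PySem.Int.floordiv 32 h - c)
      if jmax ≥ 1 then
        (if i * jmax * h ≥ st.1 then (i * jmax * h, i, jmax, h) else st)
      else st) st) ((0:Int), (2:Int), (1:Int), (2:Int))
  [st.2.1, st.2.2.1, st.2.2.2]

-- ===== PRECONDITION & SPEC =====
-- Python A raises ZeroDivisionError on v_size = 0 (first line `m % v_size`); nothing else raises.
def Pre_get_blocksize (m : Int) (n : Int) (k : Int) (v_size : Int) : Prop := v_size ≠ 0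
instance (m : Int) (n : Int) (k : Int) (v_size : Int) : Decidable (Pre_get_blocksize m n k v_size) := by unfold Pre_get_blocksize; infer_instance
def pvWitness_get_blocksize : Int × Int × Int × Int := (4, 4, 4, 2)

def Spec_get_blocksize (m : Int) (n : Int) (k : Int) (v_size : Int) (out : List Int) : Prop := out = get_blocksize_alt m n k v_size
instance (m : Int) (n : Int) (k : Int) (v_size : Int) (out : List Int) : Decidable (Spec_get_blocksize m n k v_size out) := by unfold Spec_get_blocksize; infer_instance

-- ===== CLAIM (what is proved, stated in full; the proofs are below) =====
def Claim_equal_get_blocksize : Prop := ∀ (m : Int) (n : Int) (k : Int) (v_size : Int), Dom_get_blocksize m n k v_size → Pre_get_blocksize m n k v_size → Spec_get_blocksize m n k v_size (get_blocksize m n k v_size)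

-- ===== LEMMAS AND PROOFS =====

-- A's feasibility test at j equals `j ≤ 32//h - c` (h > 0).
lemma pv_cond_iff (h c j : Int) (hh : 0 < h) :
    ((j*0 + h) * c + j * h ≤ 32) ↔ j ≤ PySem.Int.floordiv 32 h - c := by
  have key := PySem.Int.le_floordiv_iff_mul_le (a := 32) (b := h) (q := j + c) hh
  constructor
  · intro hle
    have hm : (j + c) * h ≤ 32 := by nlinarith
    have := key.mpr hm; omega
  · intro hle
    have := key.mp (by omega : j + c ≤ PySem.Int.floordiv 32 h)
    nlinarith

-- The inner j-loop over 1..n collapses to the single candidate jmax = min n (32//h - c).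
lemma pv_inner_nat (t : Nat) (c h i : Int) (hh : 2 ≤ h) (hi : 1 ≤ i)
    (st : Int × Int × Int × Int) :
    (PySem.List.pyRange 1 ((t:Int)+1) 1).foldl
      (fun st j => if (j*0 + h) * c + j * h ≤ 32 then
          (if i * j * h ≥ st.1 then (i * j * h, i, j, h) else st) else st) st
    = (if min (t:Int) (PySem.Int.floordiv 32 h - c) ≥ 1 then
        (if i * (min (t:Int) (PySem.Int.floordiv 32 h - c)) * h ≥ st.1 then
          (i * (min (t:Int) (PySem.Int.floordiv 32 h - c)) * h, i,
            min (t:Int) (PySem.Int.floordiv 32 h - c), h)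
        else st)
      else st) := by
  induction t generalizing st with
  | zero =>
    rw [PySem.List.pyRange_one_eq_nil (by norm_num)]
    simp only [List.foldl_nil]
    rw [if_neg]
    have : min (0:Int) (PySem.Int.floordiv 32 h - c) ≤ 0 := min_le_left _ _
    omega
  | succ t ih =>
    set J := PySem.Int.floordiv 32 h - c with hJ
    have hcast : ((t+1:Nat):Int) = (t:Int) + 1 := by push_cast; ring
    rw [hcast, PySem.List.pyRange_one_succ_right (by omega), List.foldl_append, ih st]
    simp only [List.foldl_cons, List.foldl_nil]
    set N : Int := (t:Int) + 1 with hNdef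
    by_cases hcond : (N*0 + h) * c + N * h ≤ 32
    · have hNJ : N ≤ J := (pv_cond_iff h c N (by omega)).mp hcond
      have hminN : min N J = N := min_eq_left hNJ
      have hmint : min (t:Int) J = (t:Int) := min_eq_left (by omega)
      rw [hmint, hminN, if_pos hcond, if_pos (by omega : N ≥ 1)]
      by_cases hbig : i * N * h ≥ st.1
      · have hmono : i * (t:Int) * h ≤ i * N * h := by nlinarith [Int.natCast_nonneg t]
        by_cases ht1 : (t:Int) ≥ 1
        · rw [if_pos ht1]
          by_cases hup : i * (t:Int) * h ≥ st.1
          · rw [if_pos hup]; simp only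
            rw [if_pos (by omega : i * N * h ≥ i * (t:Int) * h), if_pos hbig]
          · rw [if_neg hup, if_pos hbig]
        · rw [if_neg ht1, if_pos hbig]
      · have hmono : i * (t:Int) * h ≤ i * N * h := by nlinarith [Int.natCast_nonneg t]
        by_cases ht1 : (t:Int) ≥ 1
        · rw [if_pos ht1, if_neg (by omega : ¬ i * (t:Int) * h ≥ st.1), if_neg hbig]
        · rw [if_neg ht1, if_neg hbig]
    · have hNJ : ¬ N ≤ J := fun hle => hcond ((pv_cond_iff h c N (by omega)).mpr hle)
      have hmint : min (t:Int) J = J := min_eq_right (by omega)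
      have hminN : min N J = J := min_eq_right (by omega)
      rw [if_neg hcond, hmint, hminN]

lemma pv_inner (n c h i : Int) (hh : 2 ≤ h) (hi : 1 ≤ i)
    (st : Int × Int × Int × Int) :
    (PySem.List.pyRange 1 (n+1) 1).foldl
      (fun st j => if (j*0 + h) * c + j * h ≤ 32 then
          (if i * j * h ≥ st.1 then (i * j * h, i, j, h) else st) else st) st
    = (if min n (PySem.Int.floordiv 32 h - c) ≥ 1 then
        (if i * (min n (PySem.Int.floordiv 32 h - c)) * h ≥ st.1 then
          (i * (min n (PySem.Int.floordiv 32 h - c)) * h, i,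
            min n (PySem.Int.floordiv 32 h - c), h)
        else st)
      else st) := by
  rcases le_or_gt n 0 with hn | hn
  · rw [PySem.List.pyRange_one_eq_nil (by omega)]
    simp only [List.foldl_nil]
    rw [if_neg]
    have : min n (PySem.Int.floordiv 32 h - c) ≤ n := min_le_left _ _
    omega
  · have : n = ((n.toNat : Int)) := by omega
    rw [this]; exact pv_inner_nat n.toNat c h i hh hi st

-- ===== VERDICT (by name: the statement is the Claim_ definition above) =====
theorem get_blocksize_spec : Claim_equal_get_blocksize := by
  intro m n k v_size _ _
  have H : (PySem.List.pyRange 2 (k+1) 1).foldl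
      (fun st h => (PySem.List.pyRange 1 (m+1) 1).foldl
        (fun st i =>
          let _next_multiple := pvWhileNext v_size v_size.natAbs i
          (PySem.List.pyRange 1 (n+1) 1).foldl
            (fun st j => if (j*0 + h) * (-(PySem.Int.floordiv i (-v_size))) + j * h ≤ 32 then
                (if i * j * h ≥ st.1 then (i * j * h, i, j, h) else st) else st) st) st)
      ((0:Int), (2:Int), (1:Int), (2:Int))
    = (PySem.List.pyRange 2 (k+1) 1).foldl
      (fun st h => (PySem.List.pyRange 1 (m+1) 1).foldl
        (fun st i =>
          let c := -(PySem.Int.floordiv i (-v_size))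
          let jmax := min n (PySem.Int.floordiv 32 h - c)
          if jmax ≥ 1 then (if i * jmax * h ≥ st.1 then (i * jmax * h, i, jmax, h) else st)
          else st) st)
      ((0:Int), (2:Int), (1:Int), (2:Int)) := by
    apply PySem.List.foldl_congr_mem
    intro acc h hmem
    have hh : 2 ≤ h := (PySem.List.mem_pyRange_one.mp hmem).1
    apply PySem.List.foldl_congr_mem
    intro acc2 i hmemi
    have hi : 1 ≤ i := (PySem.List.mem_pyRange_one.mp hmemi).1
    simpa using pv_inner n (-(PySem.Int.floordiv i (-v_size))) h i hh hi acc2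
  unfold Spec_get_blocksize get_blocksize get_blocksize_alt
  simp only [H]
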